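-- pv_equiv track=rewrite | github.com/dmwm/WMCore | src/python/WMCore/WMSpec/Steps/Templates/CMSSW.py | getPhysicsTypeFromStepsArg
-- ===== SOURCE A (Python) =====
-- def getPhysicsTypeFromStepsArg(stepsArg, hasPileup=False, hasDatamix=False):
--     """
--     Get information about the step physics type, based on the
--     cmsDriver command line --steps argument
--     Reference: https://github.com/cms-sw/cmssw/issues/42587
--     :param stepsArg: str with the cmsDriver step arguments
--     :param hasPileup: bool, cmsDriver option
--     :param hasDatamix: bool, cmsDriver option
--     :return: str with all physics types, comman separated
--     """
--     physicsTypes = {"GEN":"GEN", "SIM":"SIM", "DIGI":"DIGI", "RECO":"RECO", "PAT":"MINIAOD", "NANO":"NANOAOD", "ALL":"GEN,SIM,DIGI,RECO"}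
--     stepTypes = []
--     for stepType in physicsTypes.keys():
--         for step in stepsArg.split(","):
--             # Steps like DIGI could come in the form of DIGI:pdigi_valid
--             step = step.split(':')[0]
--             if step == stepType:
--                 physicsType = physicsTypes.get(stepType)
--                 if step == "DIGI":
--                     if hasPileup:
--                         if hasDatamix:
--                             physicsType = "DIGI_premix"
--                         else:
--                             physicsType = "DIGI_classicalmix"
--                     else:
--                         physicsType = "DIGI_nopileup"
--                 stepTypes.append(physicsType)
--     if not stepTypes:
--         stepTypes.append("UNKNOWN")
--
--     return ",".join(stepTypes)
-- ===== SOURCE B (Python) =====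
-- def getPhysicsTypeFromStepsArg(stepsArg, hasPileup=False, hasDatamix=False):
--     """One counting pass over the steps plus one pass over the label table,
--     instead of rescanning the steps once per physics type."""
--     if hasPileup:
--         digi = "DIGI_premix" if hasDatamix else "DIGI_classicalmix"
--     else:
--         digi = "DIGI_nopileup"
--     labels = {"GEN": "GEN", "SIM": "SIM", "DIGI": digi, "RECO": "RECO",
--               "PAT": "MINIAOD", "NANO": "NANOAOD", "ALL": "GEN,SIM,DIGI,RECO"}
--     counts = {}
--     for step in stepsArg.split(","):
--         base = step.split(':')[0]
--         counts[base] = counts.get(base, 0) + 1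
--     pieces = []
--     for key, label in labels.items():
--         pieces.extend([label] * counts.get(key, 0))
--     return ",".join(pieces) if pieces else "UNKNOWN"
-- ===== Notes on version B (the rewrite author's own statement) =====
-- stated objective: alternative
-- what changed: B replaces A's seven rescans of the split steps (one per physics-type key) by a single counting pass that builds a base-step frequency dict, then emits each label repeated by its count in key order.
import Mathlib
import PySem

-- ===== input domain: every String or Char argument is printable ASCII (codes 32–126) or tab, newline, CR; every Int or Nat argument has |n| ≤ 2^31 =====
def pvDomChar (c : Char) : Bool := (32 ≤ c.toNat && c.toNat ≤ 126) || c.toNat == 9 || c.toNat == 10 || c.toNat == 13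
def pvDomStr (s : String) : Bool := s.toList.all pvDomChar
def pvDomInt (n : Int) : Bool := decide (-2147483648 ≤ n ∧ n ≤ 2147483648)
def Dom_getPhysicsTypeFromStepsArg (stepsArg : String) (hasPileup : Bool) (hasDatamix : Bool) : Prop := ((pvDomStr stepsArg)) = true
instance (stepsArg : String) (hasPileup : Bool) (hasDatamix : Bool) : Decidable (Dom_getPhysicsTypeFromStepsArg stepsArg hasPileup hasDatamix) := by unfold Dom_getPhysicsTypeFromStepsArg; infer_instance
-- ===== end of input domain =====

-- B replaces A's seven rescans of the split steps (one per physics-type key) by one counting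
-- pass over the steps plus one pass over the label table (objective: alternative algorithm).

-- shared by both ports: Python's step.split(':')[0] (split never returns an empty list)
def pvSplitBase (step : String) : String := ((PySem.Str.split? step ":").getD []).headD ""
def pvPhysicsTypes : PySem.Dict String String :=
  PySem.Dict.ofList [("GEN","GEN"),("SIM","SIM"),("DIGI","DIGI"),("RECO","RECO"),
                     ("PAT","MINIAOD"),("NANO","NANOAOD"),("ALL","GEN,SIM,DIGI,RECO")]
def getPhysicsTypeFromStepsArg (stepsArg : String) (hasPileup : Bool) (hasDatamix : Bool) : String :=
  let stepTypes : List String :=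
    (PySem.Dict.keys pvPhysicsTypes).foldl (fun acc stepType =>
      ((PySem.Str.split? stepsArg ",").getD []).foldl (fun acc step =>
        let step := pvSplitBase step
        if step == stepType then
          let physicsType := (PySem.Dict.get? pvPhysicsTypes stepType).getD ""
          let physicsType := if step == "DIGI" then
              (if hasPileup then (if hasDatamix then "DIGI_premix" else "DIGI_classicalmix")
               else "DIGI_nopileup")
            else physicsType
          acc ++ [physicsType]
        else acc) acc) []
  let stepTypes := if stepTypes = [] then ["UNKNOWN"] else stepTypes
  PySem.Str.join "," stepTypes
def getPhysicsTypeFromStepsArg_alt (stepsArg : String) (hasPileup : Bool) (hasDatamix : Bool) : String :=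
  let digi := if hasPileup then (if hasDatamix then "DIGI_premix" else "DIGI_classicalmix")
              else "DIGI_nopileup"
  let labels : PySem.Dict String String :=
    PySem.Dict.ofList [("GEN","GEN"),("SIM","SIM"),("DIGI",digi),("RECO","RECO"),
                       ("PAT","MINIAOD"),("NANO","NANOAOD"),("ALL","GEN,SIM,DIGI,RECO")]
  let counts : PySem.Dict String Int :=
    ((PySem.Str.split? stepsArg ",").getD []).foldl
      (fun counts step =>
        let base := pvSplitBase step
        counts.insert base (counts.getD base 0 + 1)) PySem.Dict.empty
  let pieces : List String :=
    (PySem.Dict.items labels).foldl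
      (fun pieces kv => pieces ++ PySem.List.pyRepeat [kv.2] (counts.getD kv.1 0)) []
  if pieces = [] then "UNKNOWN" else PySem.Str.join "," pieces


-- ===== PRECONDITION & SPEC =====
def Spec_getPhysicsTypeFromStepsArg (stepsArg : String) (hasPileup : Bool) (hasDatamix : Bool) (out : String) : Prop := out = getPhysicsTypeFromStepsArg_alt stepsArg hasPileup hasDatamix
instance (stepsArg : String) (hasPileup : Bool) (hasDatamix : Bool) (out : String) : Decidable (Spec_getPhysicsTypeFromStepsArg stepsArg hasPileup hasDatamix out) := by unfold Spec_getPhysicsTypeFromStepsArg; infer_instance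

-- ===== CLAIM (what is proved, stated in full; the proofs are below) =====
def Claim_equal_getPhysicsTypeFromStepsArg : Prop := ∀ (stepsArg : String) (hasPileup : Bool) (hasDatamix : Bool), Dom_getPhysicsTypeFromStepsArg stepsArg hasPileup hasDatamix → Spec_getPhysicsTypeFromStepsArg stepsArg hasPileup hasDatamix (getPhysicsTypeFromStepsArg stepsArg hasPileup hasDatamix)

-- ===== LEMMAS AND PROOFS =====
theorem pv_inner (steps : List String) (k : String) (L dg : String) (acc : List String) :
    steps.foldl (fun acc step =>
      let step := pvSplitBase step
      if step == k then
        let physicsType := L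
        let physicsType := if step == "DIGI" then dg else physicsType
        acc ++ [physicsType]
      else acc) acc
    = acc ++ List.replicate ((steps.map pvSplitBase).count k)
          (if k == "DIGI" then dg else L) := by
  induction steps generalizing acc with
  | nil => simp
  | cons s t ih =>
    simp only [List.foldl_cons, List.map_cons, List.count_cons, ih]
    by_cases h : pvSplitBase s = k
    · simp [h, List.replicate_succ, List.append_assoc]
    · simp [h]

theorem pv_count (steps : List String) (v : String) :
    PySem.Dict.getD (steps.foldl (fun counts step =>
        let base := pvSplitBase step
        PySem.Dict.insert counts base (PySem.Dict.getD counts base 0 + 1)) PySem.Dict.empty) v 0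
      = ((steps.map pvSplitBase).count v : Int) := by
  have h := PySem.Dict.getD_foldl_insert_add_one (steps.map pvSplitBase) PySem.Dict.empty v
  rw [List.foldl_map] at h
  simpa [PySem.Dict.empty, PySem.Dict.getD, PySem.Dict.get?] using h

theorem pv_items (d : String) :
    PySem.Dict.items (PySem.Dict.ofList [("GEN","GEN"),("SIM","SIM"),("DIGI",d),("RECO","RECO"),
      ("PAT","MINIAOD"),("NANO","NANOAOD"),("ALL","GEN,SIM,DIGI,RECO")])
    = [("GEN","GEN"),("SIM","SIM"),("DIGI",d),("RECO","RECO"),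
       ("PAT","MINIAOD"),("NANO","NANOAOD"),("ALL","GEN,SIM,DIGI,RECO")] := rfl

theorem pv_main (stepsArg : String) (hasPileup : Bool) (hasDatamix : Bool) :
    getPhysicsTypeFromStepsArg stepsArg hasPileup hasDatamix
      = getPhysicsTypeFromStepsArg_alt stepsArg hasPileup hasDatamix := by
  have hkeys : PySem.Dict.keys pvPhysicsTypes = ["GEN","SIM","DIGI","RECO","PAT","NANO","ALL"] := by decide
  have hGEN : (PySem.Dict.get? pvPhysicsTypes "GEN").getD "" = "GEN" := by decide
  have hSIM : (PySem.Dict.get? pvPhysicsTypes "SIM").getD "" = "SIM" := by decide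
  have hDIGI : (PySem.Dict.get? pvPhysicsTypes "DIGI").getD "" = "DIGI" := by decide
  have hRECO : (PySem.Dict.get? pvPhysicsTypes "RECO").getD "" = "RECO" := by decide
  have hPAT : (PySem.Dict.get? pvPhysicsTypes "PAT").getD "" = "MINIAOD" := by decide
  have hNANO : (PySem.Dict.get? pvPhysicsTypes "NANO").getD "" = "NANOAOD" := by decide
  have hALL : (PySem.Dict.get? pvPhysicsTypes "ALL").getD "" = "GEN,SIM,DIGI,RECO" := by decide
  simp only [getPhysicsTypeFromStepsArg, getPhysicsTypeFromStepsArg_alt, hkeys,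
    List.foldl_cons, List.foldl_nil, pv_items, pv_inner, pv_count,
    PySem.List.pyRepeat_singleton, Int.toNat_natCast,
    hGEN, hSIM, hDIGI, hRECO, hPAT, hNANO, hALL]
  simp only [show (("GEN":String)=="DIGI")=false from by decide, show (("SIM":String)=="DIGI")=false from by decide,
    show (("DIGI":String)=="DIGI")=true from by decide, show (("RECO":String)=="DIGI")=false from by decide,
    show (("PAT":String)=="DIGI")=false from by decide, show (("NANO":String)=="DIGI")=false from by decide,
    show (("ALL":String)=="DIGI")=false from by decide, Bool.false_eq_true, if_true, if_false, List.nil_append]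
  split_ifs <;> first | rfl | decide

-- ===== VERDICT (by name: the statement is the Claim_ definition above) =====
theorem getPhysicsTypeFromStepsArg_spec : Claim_equal_getPhysicsTypeFromStepsArg := by
  intro stepsArg hasPileup hasDatamix _
  exact pv_main stepsArg hasPileup hasDatamix
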